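-- pv_equiv track=rewrite | github.com/SHA-inc-unity/VKR_2026_ModelBase | build_market_dataset_to_postgres.py | group_missing_ranges
-- ===== SOURCE A (Python) =====
-- def group_missing_ranges(timestamps: list[int], step_ms: int) -> list[tuple[int, int]]:
--     """Склеивает соседние пропуски в диапазоны загрузки."""
--     if not timestamps:
--         return []
--     ranges = []
--     range_start = timestamps[0]
--     previous = timestamps[0]
--     for timestamp in timestamps[1:]:
--         if timestamp != previous + step_ms:
--             ranges.append((range_start, previous))
--             range_start = timestamp
--         previous = timestamp
--     ranges.append((range_start, previous))
--     return ranges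
-- ===== SOURCE B (Python) =====
-- def group_missing_ranges(timestamps: list[int], step_ms: int) -> list[tuple[int, int]]:
--     """Break-pair formulation: find adjacent pairs that break the step, then zip range starts with range ends."""
--     if not timestamps:
--         return []
--     breaks = [(a, b) for a, b in zip(timestamps, timestamps[1:]) if b != a + step_ms]
--     starts = [timestamps[0]] + [b for _, b in breaks]
--     ends = [a for a, _ in breaks] + [timestamps[-1]]
--     return list(zip(starts, ends))
-- ===== Notes on version B (the rewrite author's own statement) =====
-- stated objective: alternative
-- what changed: Replaces the running (ranges, range_start, previous) accumulator loop by a declarative construction: filter adjacent pairs that break the step to get the boundaries, then zip the list of range starts with the list of range ends.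
import Mathlib
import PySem

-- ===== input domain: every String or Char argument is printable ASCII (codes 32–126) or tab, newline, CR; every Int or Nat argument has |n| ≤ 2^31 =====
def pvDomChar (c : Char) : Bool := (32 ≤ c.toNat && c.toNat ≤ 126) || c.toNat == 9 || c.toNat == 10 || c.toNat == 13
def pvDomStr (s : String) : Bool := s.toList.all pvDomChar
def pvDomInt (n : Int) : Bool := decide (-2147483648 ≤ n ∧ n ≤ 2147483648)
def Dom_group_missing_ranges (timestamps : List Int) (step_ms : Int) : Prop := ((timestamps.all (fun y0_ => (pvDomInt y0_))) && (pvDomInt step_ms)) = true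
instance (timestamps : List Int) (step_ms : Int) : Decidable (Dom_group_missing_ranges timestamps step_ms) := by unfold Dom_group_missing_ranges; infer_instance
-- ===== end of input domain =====

-- B replaces A's running-accumulator loop by a break-pair construction (filter adjacent pairs, zip starts with ends): alternative algorithm, same cost.


-- ===== PORT A =====
-- literal port of A: fold over timestamps[1:] with state (ranges, range_start, previous)
def group_missing_ranges (timestamps : List Int) (step_ms : Int) : List (Int × Int) :=
  match timestamps with
  | [] => []
  | t0 :: rest =>
    let st := rest.foldl
      (fun (s : List (Int × Int) × Int × Int) timestamp =>
        let ranges := s.1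
        let range_start := s.2.1
        let previous := s.2.2
        if timestamp ≠ previous + step_ms then
          (ranges ++ [(range_start, previous)], timestamp, timestamp)
        else
          (ranges, range_start, timestamp))
      ([], t0, t0)
    st.1 ++ [(st.2.1, st.2.2)]

-- ===== PORT B =====
-- literal port of Source B: breaks = adjacent pairs violating the step; zip starts with ends
def group_missing_ranges_alt (timestamps : List Int) (step_ms : Int) : List (Int × Int) :=
  match timestamps with
  | [] => []
  | t0 :: rest =>
    let breaks := (List.zip (t0 :: rest) rest).filter (fun p => decide (p.2 ≠ p.1 + step_ms))
    let starts := [t0] ++ breaks.map (fun p => p.2)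
    let ends := breaks.map (fun p => p.1) ++ [(t0 :: rest).getLast (by simp)]
    List.zip starts ends

-- ===== PRECONDITION & SPEC =====
def Spec_group_missing_ranges (timestamps : List Int) (step_ms : Int) (out : List (Int × Int)) : Prop := out = group_missing_ranges_alt timestamps step_ms
instance (timestamps : List Int) (step_ms : Int) (out : List (Int × Int)) : Decidable (Spec_group_missing_ranges timestamps step_ms out) := by unfold Spec_group_missing_ranges; infer_instance

-- ===== CLAIM (what is proved, stated in full; the proofs are below) =====
def Claim_equal_group_missing_ranges : Prop := ∀ (timestamps : List Int) (step_ms : Int), Dom_group_missing_ranges timestamps step_ms → Spec_group_missing_ranges timestamps step_ms (group_missing_ranges timestamps step_ms)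

-- ===== LEMMAS AND PROOFS =====
-- proof-side middle form: recursion with (start, prev) state; both ports are shown equal to it
def gmrRec (step_ms : Int) (start prev : Int) (rest : List Int) : List (Int × Int) :=
  match rest with
  | [] => [(start, prev)]
  | t :: rs =>
    if t ≠ prev + step_ms then
      (start, prev) :: gmrRec step_ms t t rs
    else
      gmrRec step_ms start t rs

-- loop invariant for A's fold
theorem gmr_fold_eq_rec (step_ms : Int) (rest : List Int) :
    ∀ (acc : List (Int × Int)) (s p : Int),
      (let st := rest.foldl
        (fun (s : List (Int × Int) × Int × Int) timestamp =>
          let ranges := s.1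
          let range_start := s.2.1
          let previous := s.2.2
          if timestamp ≠ previous + step_ms then
            (ranges ++ [(range_start, previous)], timestamp, timestamp)
          else
            (ranges, range_start, timestamp))
        (acc, s, p)
      st.1 ++ [(st.2.1, st.2.2)]) = acc ++ gmrRec step_ms s p rest := by
  induction rest with
  | nil => intro acc s p; simp [gmrRec]
  | cons t rs ih =>
    intro acc s p
    by_cases h : t ≠ p + step_ms
    · simp only [List.foldl_cons, gmrRec, if_pos h]
      rw [show (acc ++ [(s, p)], t, t) = ((acc ++ [(s, p)] : List (Int × Int)), t, t) from rfl]
      simpa using ih (acc ++ [(s, p)]) t t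
    · simp only [List.foldl_cons, gmrRec, if_neg h]
      exact ih acc s t

-- B's break-pair construction equals the middle form
theorem gmr_zip_eq_rec (step_ms : Int) (rest : List Int) :
    ∀ (s p : Int),
      List.zip
        (s :: (((List.zip (p :: rest) rest).filter (fun q => decide (q.2 ≠ q.1 + step_ms))).map (fun q => q.2)))
        ((((List.zip (p :: rest) rest).filter (fun q => decide (q.2 ≠ q.1 + step_ms))).map (fun q => q.1))
          ++ [(p :: rest).getLast (by simp)])
      = gmrRec step_ms s p rest := by
  induction rest with
  | nil => intro s p; simp [gmrRec]
  | cons t rs ih =>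
    intro s p
    have hlast : (p :: t :: rs).getLast (by simp) = (t :: rs).getLast (by simp) := by
      simp [List.getLast]
    by_cases h : t ≠ p + step_ms
    · simp only [List.zip_cons_cons, List.filter_cons, decide_eq_true_eq, if_pos h,
        List.map_cons, List.cons_append, gmrRec, hlast]
      exact congrArg (List.cons (s, p)) (ih t t)
    · simp only [List.zip_cons_cons, List.filter_cons, decide_eq_true_eq, if_neg h,
        gmrRec, hlast]
      exact ih s t

-- ===== VERDICT (by name: the statement is the Claim_ definition above) =====
theorem group_missing_ranges_spec : Claim_equal_group_missing_ranges := by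
  intro timestamps step_ms _
  unfold Spec_group_missing_ranges
  cases timestamps with
  | nil => rfl
  | cons t0 rest =>
    have hA := gmr_fold_eq_rec step_ms rest [] t0 t0
    have hB := gmr_zip_eq_rec step_ms rest t0 t0
    simp only [group_missing_ranges, group_missing_ranges_alt]
    simpa using hA.trans (by simpa using hB.symm)
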